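-- pv_equiv track=rewrite | github.com/aditdp/gmt_pyplotter_v2.0 | utils.py | recommend_dem_resolution
-- ===== SOURCE A (Python) =====
-- RECOMMENDED_DEM_RESOLUTION = [
--     (50000, "01s"),
--     (150000, "03s"),
--     (700000, "15s"),
--     (2000000, "30s"),
--     (4000000, "01m"),
--     (6000000, "02m"),
--     (8000000, "03m"),
--     (10000000, "05m"),
--     (12500000, "10m"),
--     (25000000, "15m"),
--     (50000000, "30m"),
--     (float("inf"), "01d"),
-- ]
--
-- def recommend_dem_resolution(map_scale_factor, for_contour=False):
--     """
--     Recommends a suitable DEM resolution (in a standard format like "01s", "05m", or "01d")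
--     based on the map scale.
--
--     Args:
--         map_scale_denominator (int): The denominator of the map's representative fraction scale
--                                      (e.g., 10000 for 1:10000).
--
--     Returns:
--         str: The recommended DEM resolution in string format, or '01m' if input is invalid'.
--     """
--
--     if not isinstance(map_scale_factor, (int, float)) or map_scale_factor <= 0:
--         return "01m"
--
--     initial_dem_res_index = -1
--     for i, (threshold, _) in enumerate(RECOMMENDED_DEM_RESOLUTION):
--         if map_scale_factor <= threshold:
--             initial_dem_res_index = i
--             break
--
--     # If map_scale_factor is larger than all defined thresholds, use the coarsest resolution
--     if initial_dem_res_index == -1: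
--         initial_dem_res_index = len(RECOMMENDED_DEM_RESOLUTION) - 1
--
--     # Get the base recommended resolution string
--     recommended_res_string = RECOMMENDED_DEM_RESOLUTION[initial_dem_res_index][1]
--
--     # Apply the "one level above" condition for contour generation
--     if for_contour:
--         # If there's a coarser resolution available in the list, use it.
--         # Otherwise, stick with the current (coarsest) resolution.
--         if initial_dem_res_index + 1 < len(RECOMMENDED_DEM_RESOLUTION):
--             recommended_res_string = RECOMMENDED_DEM_RESOLUTION[
--                 initial_dem_res_index + 1
--             ][1]
--
--     return recommended_res_string
-- ===== SOURCE B (Python) =====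
-- RECOMMENDED_DEM_RESOLUTION = [
--     (50000, "01s"),
--     (150000, "03s"),
--     (700000, "15s"),
--     (2000000, "30s"),
--     (4000000, "01m"),
--     (6000000, "02m"),
--     (8000000, "03m"),
--     (10000000, "05m"),
--     (12500000, "10m"),
--     (25000000, "15m"),
--     (50000000, "30m"),
--     (float("inf"), "01d"),
-- ]
--
-- _THRESHOLDS = [t for t, _ in RECOMMENDED_DEM_RESOLUTION[:-1]]  # finite thresholds
-- _LABELS = [label for _, label in RECOMMENDED_DEM_RESOLUTION]
--
--
-- def _bisect_left(xs, x, lo, hi):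
--     """First index in [lo, hi) with xs[idx] >= x (hand-written: A imports nothing)."""
--     while lo < hi:
--         mid = (lo + hi) // 2
--         if xs[mid] < x:
--             lo = mid + 1
--         else:
--             hi = mid
--     return lo
--
--
-- def recommend_dem_resolution(map_scale_factor, for_contour=False):
--     if not isinstance(map_scale_factor, (int, float)) or map_scale_factor <= 0:
--         return "01m"
--     idx = _bisect_left(_THRESHOLDS, map_scale_factor, 0, len(_THRESHOLDS))
--     if for_contour:
--         idx = min(idx + 1, len(_LABELS) - 1)
--     return _LABELS[idx]
-- ===== Notes on version B (the rewrite author's own statement) =====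
-- stated objective: alternative
-- what changed: Replaced the linear enumerate-scan over the threshold table (with a -1 sentinel and fall-through patch-up) by a hand-written binary search over the finite thresholds with direct label indexing (min for the contour bump).
import Mathlib
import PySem

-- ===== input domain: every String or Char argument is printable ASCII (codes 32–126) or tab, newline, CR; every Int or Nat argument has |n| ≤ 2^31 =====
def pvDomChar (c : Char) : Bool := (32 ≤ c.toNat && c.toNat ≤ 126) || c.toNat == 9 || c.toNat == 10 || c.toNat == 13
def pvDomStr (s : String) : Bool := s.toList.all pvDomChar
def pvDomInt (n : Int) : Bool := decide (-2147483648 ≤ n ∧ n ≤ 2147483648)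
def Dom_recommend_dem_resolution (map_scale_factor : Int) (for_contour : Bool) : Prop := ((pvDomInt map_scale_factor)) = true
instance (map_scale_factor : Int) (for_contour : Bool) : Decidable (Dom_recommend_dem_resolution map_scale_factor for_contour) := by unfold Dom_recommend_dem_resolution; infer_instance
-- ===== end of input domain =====

-- B replaces A's linear enumerate-scan over the table (sentinel -1 plus fall-through fix-up)
-- by a hand-written binary search over the finite thresholds; same return value on all Int
-- inputs (for Int the isinstance guard of both Pythons is always satisfied).

-- ===== PORT A =====
-- the table; the float("inf") threshold is ported as `none` (compares ≥ any int), exact here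
def pvTableA : List (Option Int × String) :=
  [(some 50000, "01s"), (some 150000, "03s"), (some 700000, "15s"), (some 2000000, "30s"),
   (some 4000000, "01m"), (some 6000000, "02m"), (some 8000000, "03m"), (some 10000000, "05m"),
   (some 12500000, "10m"), (some 25000000, "15m"), (some 50000000, "30m"), (none, "01d")]

-- `map_scale_factor <= threshold` where the threshold may be inf (none): inf is ≥ any int
def pvLeThresh (x : Int) : Option Int → Bool
  | none => true
  | some v => x ≤ v

-- the enumerate-loop with break: first index whose threshold admits x, else the sentinel -1
def pvFindIdxA (x : Int) : List (Option Int × String) → Int → Int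
  | [], _ => -1
  | (t, _) :: rest, i => if pvLeThresh x t then i else pvFindIdxA x rest (i + 1)

def recommend_dem_resolution (map_scale_factor : Int) (for_contour : Bool) : String :=
  -- isinstance(map_scale_factor, (int, float)) is always true for an Int argument
  if map_scale_factor ≤ 0 then "01m"
  else
    let i0 := pvFindIdxA map_scale_factor pvTableA 0
    let idx := if i0 = -1 then (pvTableA.length : Int) - 1 else i0
    let base := ((PySem.List.pyGet? pvTableA idx).map Prod.snd).getD ""  -- index always in range
    if for_contour then
      if idx + 1 < (pvTableA.length : Int) then
        ((PySem.List.pyGet? pvTableA (idx + 1)).map Prod.snd).getD ""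
      else base
    else base

-- ===== PORT B =====
def pvThresholds : List Int :=
  [50000, 150000, 700000, 2000000, 4000000, 6000000, 8000000, 10000000, 12500000, 25000000, 50000000]

def pvLabels : List String :=
  ["01s", "03s", "15s", "30s", "01m", "02m", "03m", "05m", "10m", "15m", "30m", "01d"]

-- hand-written bisect_left loop, as in Source B (indices stay in range, so getD is exact)
def pvBisectLeft (xs : List Int) (x : Int) (lo hi : Nat) : Nat :=
  if _h : lo < hi then
    let mid := (lo + hi) / 2
    if xs.getD mid 0 < x then pvBisectLeft xs x (mid + 1) hi
    else pvBisectLeft xs x lo mid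
  else lo
termination_by hi - lo
decreasing_by all_goals omega

def recommend_dem_resolution_alt (map_scale_factor : Int) (for_contour : Bool) : String :=
  if map_scale_factor ≤ 0 then "01m"
  else
    let idx := pvBisectLeft pvThresholds map_scale_factor 0 pvThresholds.length
    let idx' := if for_contour then min (idx + 1) (pvLabels.length - 1) else idx
    pvLabels.getD idx' ""

-- ===== PRECONDITION & SPEC =====
def Spec_recommend_dem_resolution (map_scale_factor : Int) (for_contour : Bool) (out : String) : Prop := out = recommend_dem_resolution_alt map_scale_factor for_contour
instance (map_scale_factor : Int) (for_contour : Bool) (out : String) : Decidable (Spec_recommend_dem_resolution map_scale_factor for_contour out) := by unfold Spec_recommend_dem_resolution; infer_instance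

-- ===== CLAIM (what is proved, stated in full; the proofs are below) =====
def Claim_equal_recommend_dem_resolution : Prop := ∀ (map_scale_factor : Int) (for_contour : Bool), Dom_recommend_dem_resolution map_scale_factor for_contour → Spec_recommend_dem_resolution map_scale_factor for_contour (recommend_dem_resolution map_scale_factor for_contour)

-- ===== LEMMAS AND PROOFS =====
theorem pvBisectLeft_step (xs : List Int) (x : Int) (lo hi : Nat) (h : lo < hi) :
    pvBisectLeft xs x lo hi =
      if xs.getD ((lo + hi) / 2) 0 < x then pvBisectLeft xs x ((lo + hi) / 2 + 1) hi
      else pvBisectLeft xs x lo ((lo + hi) / 2) := by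
  rw [pvBisectLeft]; simp [h]

theorem pvBisectLeft_base (xs : List Int) (x : Int) (lo : Nat) :
    pvBisectLeft xs x lo lo = lo := by
  rw [pvBisectLeft]; simp

set_option maxHeartbeats 1000000 in
theorem pvBisectLeft_eval (x : Int) : pvBisectLeft pvThresholds x 0 11 =
    (if x ≤ 50000 then 0 else if x ≤ 150000 then 1 else if x ≤ 700000 then 2
     else if x ≤ 2000000 then 3 else if x ≤ 4000000 then 4 else if x ≤ 6000000 then 5
     else if x ≤ 8000000 then 6 else if x ≤ 10000000 then 7 else if x ≤ 12500000 then 8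
     else if x ≤ 25000000 then 9 else if x ≤ 50000000 then 10 else 11) := by
  by_cases h1 : x ≤ 50000
  · rw [pvBisectLeft_step pvThresholds x 0 11 (by norm_num)]
    simp only [Nat.reduceAdd, Nat.reduceDiv]
    rw [if_neg (by norm_num [pvThresholds]; omega)]
    rw [pvBisectLeft_step pvThresholds x 0 5 (by norm_num)]
    simp only [Nat.reduceAdd, Nat.reduceDiv]
    rw [if_neg (by norm_num [pvThresholds]; omega)]
    rw [pvBisectLeft_step pvThresholds x 0 2 (by norm_num)]
    simp only [Nat.reduceAdd, Nat.reduceDiv]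
    rw [if_neg (by norm_num [pvThresholds]; omega)]
    rw [pvBisectLeft_step pvThresholds x 0 1 (by norm_num)]
    simp only [Nat.reduceAdd, Nat.reduceDiv]
    rw [if_neg (by norm_num [pvThresholds]; omega)]
    rw [pvBisectLeft_base]
    split_ifs <;> omega
  ·
    by_cases h2 : x ≤ 150000
    · rw [pvBisectLeft_step pvThresholds x 0 11 (by norm_num)]
      simp only [Nat.reduceAdd, Nat.reduceDiv]
      rw [if_neg (by norm_num [pvThresholds]; omega)]
      rw [pvBisectLeft_step pvThresholds x 0 5 (by norm_num)]
      simp only [Nat.reduceAdd, Nat.reduceDiv]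
      rw [if_neg (by norm_num [pvThresholds]; omega)]
      rw [pvBisectLeft_step pvThresholds x 0 2 (by norm_num)]
      simp only [Nat.reduceAdd, Nat.reduceDiv]
      rw [if_neg (by norm_num [pvThresholds]; omega)]
      rw [pvBisectLeft_step pvThresholds x 0 1 (by norm_num)]
      simp only [Nat.reduceAdd, Nat.reduceDiv]
      rw [if_pos (by norm_num [pvThresholds]; omega)]
      rw [pvBisectLeft_base]
      split_ifs <;> omega
    ·
      by_cases h3 : x ≤ 700000
      · rw [pvBisectLeft_step pvThresholds x 0 11 (by norm_num)]
        simp only [Nat.reduceAdd, Nat.reduceDiv]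
        rw [if_neg (by norm_num [pvThresholds]; omega)]
        rw [pvBisectLeft_step pvThresholds x 0 5 (by norm_num)]
        simp only [Nat.reduceAdd, Nat.reduceDiv]
        rw [if_neg (by norm_num [pvThresholds]; omega)]
        rw [pvBisectLeft_step pvThresholds x 0 2 (by norm_num)]
        simp only [Nat.reduceAdd, Nat.reduceDiv]
        rw [if_pos (by norm_num [pvThresholds]; omega)]
        rw [pvBisectLeft_base]
        split_ifs <;> omega
      ·
        by_cases h4 : x ≤ 2000000
        · rw [pvBisectLeft_step pvThresholds x 0 11 (by norm_num)]
          simp only [Nat.reduceAdd, Nat.reduceDiv]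
          rw [if_neg (by norm_num [pvThresholds]; omega)]
          rw [pvBisectLeft_step pvThresholds x 0 5 (by norm_num)]
          simp only [Nat.reduceAdd, Nat.reduceDiv]
          rw [if_pos (by norm_num [pvThresholds]; omega)]
          rw [pvBisectLeft_step pvThresholds x 3 5 (by norm_num)]
          simp only [Nat.reduceAdd, Nat.reduceDiv]
          rw [if_neg (by norm_num [pvThresholds]; omega)]
          rw [pvBisectLeft_step pvThresholds x 3 4 (by norm_num)]
          simp only [Nat.reduceAdd, Nat.reduceDiv]
          rw [if_neg (by norm_num [pvThresholds]; omega)]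
          rw [pvBisectLeft_base]
          split_ifs <;> omega
        ·
          by_cases h5 : x ≤ 4000000
          · rw [pvBisectLeft_step pvThresholds x 0 11 (by norm_num)]
            simp only [Nat.reduceAdd, Nat.reduceDiv]
            rw [if_neg (by norm_num [pvThresholds]; omega)]
            rw [pvBisectLeft_step pvThresholds x 0 5 (by norm_num)]
            simp only [Nat.reduceAdd, Nat.reduceDiv]
            rw [if_pos (by norm_num [pvThresholds]; omega)]
            rw [pvBisectLeft_step pvThresholds x 3 5 (by norm_num)]
            simp only [Nat.reduceAdd, Nat.reduceDiv]
            rw [if_neg (by norm_num [pvThresholds]; omega)]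
            rw [pvBisectLeft_step pvThresholds x 3 4 (by norm_num)]
            simp only [Nat.reduceAdd, Nat.reduceDiv]
            rw [if_pos (by norm_num [pvThresholds]; omega)]
            rw [pvBisectLeft_base]
            split_ifs <;> omega
          ·
            by_cases h6 : x ≤ 6000000
            · rw [pvBisectLeft_step pvThresholds x 0 11 (by norm_num)]
              simp only [Nat.reduceAdd, Nat.reduceDiv]
              rw [if_neg (by norm_num [pvThresholds]; omega)]
              rw [pvBisectLeft_step pvThresholds x 0 5 (by norm_num)]
              simp only [Nat.reduceAdd, Nat.reduceDiv]
              rw [if_pos (by norm_num [pvThresholds]; omega)]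
              rw [pvBisectLeft_step pvThresholds x 3 5 (by norm_num)]
              simp only [Nat.reduceAdd, Nat.reduceDiv]
              rw [if_pos (by norm_num [pvThresholds]; omega)]
              rw [pvBisectLeft_base]
              split_ifs <;> omega
            ·
              by_cases h7 : x ≤ 8000000
              · rw [pvBisectLeft_step pvThresholds x 0 11 (by norm_num)]
                simp only [Nat.reduceAdd, Nat.reduceDiv]
                rw [if_pos (by norm_num [pvThresholds]; omega)]
                rw [pvBisectLeft_step pvThresholds x 6 11 (by norm_num)]
                simp only [Nat.reduceAdd, Nat.reduceDiv]
                rw [if_neg (by norm_num [pvThresholds]; omega)]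
                rw [pvBisectLeft_step pvThresholds x 6 8 (by norm_num)]
                simp only [Nat.reduceAdd, Nat.reduceDiv]
                rw [if_neg (by norm_num [pvThresholds]; omega)]
                rw [pvBisectLeft_step pvThresholds x 6 7 (by norm_num)]
                simp only [Nat.reduceAdd, Nat.reduceDiv]
                rw [if_neg (by norm_num [pvThresholds]; omega)]
                rw [pvBisectLeft_base]
                split_ifs <;> omega
              ·
                by_cases h8 : x ≤ 10000000
                · rw [pvBisectLeft_step pvThresholds x 0 11 (by norm_num)]
                  simp only [Nat.reduceAdd, Nat.reduceDiv]
                  rw [if_pos (by norm_num [pvThresholds]; omega)]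
                  rw [pvBisectLeft_step pvThresholds x 6 11 (by norm_num)]
                  simp only [Nat.reduceAdd, Nat.reduceDiv]
                  rw [if_neg (by norm_num [pvThresholds]; omega)]
                  rw [pvBisectLeft_step pvThresholds x 6 8 (by norm_num)]
                  simp only [Nat.reduceAdd, Nat.reduceDiv]
                  rw [if_neg (by norm_num [pvThresholds]; omega)]
                  rw [pvBisectLeft_step pvThresholds x 6 7 (by norm_num)]
                  simp only [Nat.reduceAdd, Nat.reduceDiv]
                  rw [if_pos (by norm_num [pvThresholds]; omega)]
                  rw [pvBisectLeft_base]
                  split_ifs <;> omega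
                ·
                  by_cases h9 : x ≤ 12500000
                  · rw [pvBisectLeft_step pvThresholds x 0 11 (by norm_num)]
                    simp only [Nat.reduceAdd, Nat.reduceDiv]
                    rw [if_pos (by norm_num [pvThresholds]; omega)]
                    rw [pvBisectLeft_step pvThresholds x 6 11 (by norm_num)]
                    simp only [Nat.reduceAdd, Nat.reduceDiv]
                    rw [if_neg (by norm_num [pvThresholds]; omega)]
                    rw [pvBisectLeft_step pvThresholds x 6 8 (by norm_num)]
                    simp only [Nat.reduceAdd, Nat.reduceDiv]
                    rw [if_pos (by norm_num [pvThresholds]; omega)]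
                    rw [pvBisectLeft_base]
                    split_ifs <;> omega
                  ·
                    by_cases h10 : x ≤ 25000000
                    · rw [pvBisectLeft_step pvThresholds x 0 11 (by norm_num)]
                      simp only [Nat.reduceAdd, Nat.reduceDiv]
                      rw [if_pos (by norm_num [pvThresholds]; omega)]
                      rw [pvBisectLeft_step pvThresholds x 6 11 (by norm_num)]
                      simp only [Nat.reduceAdd, Nat.reduceDiv]
                      rw [if_pos (by norm_num [pvThresholds]; omega)]
                      rw [pvBisectLeft_step pvThresholds x 9 11 (by norm_num)]
                      simp only [Nat.reduceAdd, Nat.reduceDiv]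
                      rw [if_neg (by norm_num [pvThresholds]; omega)]
                      rw [pvBisectLeft_step pvThresholds x 9 10 (by norm_num)]
                      simp only [Nat.reduceAdd, Nat.reduceDiv]
                      rw [if_neg (by norm_num [pvThresholds]; omega)]
                      rw [pvBisectLeft_base]
                      split_ifs <;> omega
                    ·
                      by_cases h11 : x ≤ 50000000
                      · rw [pvBisectLeft_step pvThresholds x 0 11 (by norm_num)]
                        simp only [Nat.reduceAdd, Nat.reduceDiv]
                        rw [if_pos (by norm_num [pvThresholds]; omega)]
                        rw [pvBisectLeft_step pvThresholds x 6 11 (by norm_num)]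
                        simp only [Nat.reduceAdd, Nat.reduceDiv]
                        rw [if_pos (by norm_num [pvThresholds]; omega)]
                        rw [pvBisectLeft_step pvThresholds x 9 11 (by norm_num)]
                        simp only [Nat.reduceAdd, Nat.reduceDiv]
                        rw [if_neg (by norm_num [pvThresholds]; omega)]
                        rw [pvBisectLeft_step pvThresholds x 9 10 (by norm_num)]
                        simp only [Nat.reduceAdd, Nat.reduceDiv]
                        rw [if_pos (by norm_num [pvThresholds]; omega)]
                        rw [pvBisectLeft_base]
                        split_ifs <;> omega
                      ·
                        rw [pvBisectLeft_step pvThresholds x 0 11 (by norm_num)]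
                        simp only [Nat.reduceAdd, Nat.reduceDiv]
                        rw [if_pos (by norm_num [pvThresholds]; omega)]
                        rw [pvBisectLeft_step pvThresholds x 6 11 (by norm_num)]
                        simp only [Nat.reduceAdd, Nat.reduceDiv]
                        rw [if_pos (by norm_num [pvThresholds]; omega)]
                        rw [pvBisectLeft_step pvThresholds x 9 11 (by norm_num)]
                        simp only [Nat.reduceAdd, Nat.reduceDiv]
                        rw [if_pos (by norm_num [pvThresholds]; omega)]
                        rw [pvBisectLeft_base]
                        split_ifs <;> omega

-- ===== VERDICT (by name: the statement is the Claim_ definition above) =====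
set_option maxHeartbeats 1000000 in
theorem recommend_dem_resolution_spec : Claim_equal_recommend_dem_resolution := by
  intro x c _
  unfold Spec_recommend_dem_resolution recommend_dem_resolution recommend_dem_resolution_alt
  by_cases h0 : x ≤ 0
  · simp [h0]
  · simp only [h0, if_false]
    rw [show pvThresholds.length = 11 from rfl, pvBisectLeft_eval]
    by_cases h1 : x ≤ 50000
    · cases c <;> simp [pvFindIdxA, pvTableA, pvLeThresh, h0, h1, PySem.List.pyGet?, PySem.List.pyIdx?, pvLabels, List.getD]
    ·
      by_cases h2 : x ≤ 150000
      · cases c <;> simp [pvFindIdxA, pvTableA, pvLeThresh, h0, h1, h2, PySem.List.pyGet?, PySem.List.pyIdx?, pvLabels, List.getD]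
      ·
        by_cases h3 : x ≤ 700000
        · cases c <;> simp [pvFindIdxA, pvTableA, pvLeThresh, h0, h1, h2, h3, PySem.List.pyGet?, PySem.List.pyIdx?, pvLabels, List.getD]
        ·
          by_cases h4 : x ≤ 2000000
          · cases c <;> simp [pvFindIdxA, pvTableA, pvLeThresh, h0, h1, h2, h3, h4, PySem.List.pyGet?, PySem.List.pyIdx?, pvLabels, List.getD]
          ·
            by_cases h5 : x ≤ 4000000
            · cases c <;> simp [pvFindIdxA, pvTableA, pvLeThresh, h0, h1, h2, h3, h4, h5, PySem.List.pyGet?, PySem.List.pyIdx?, pvLabels, List.getD]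
            ·
              by_cases h6 : x ≤ 6000000
              · cases c <;> simp [pvFindIdxA, pvTableA, pvLeThresh, h0, h1, h2, h3, h4, h5, h6, PySem.List.pyGet?, PySem.List.pyIdx?, pvLabels, List.getD]
              ·
                by_cases h7 : x ≤ 8000000
                · cases c <;> simp [pvFindIdxA, pvTableA, pvLeThresh, h0, h1, h2, h3, h4, h5, h6, h7, PySem.List.pyGet?, PySem.List.pyIdx?, pvLabels, List.getD]
                ·
                  by_cases h8 : x ≤ 10000000
                  · cases c <;> simp [pvFindIdxA, pvTableA, pvLeThresh, h0, h1, h2, h3, h4, h5, h6, h7, h8, PySem.List.pyGet?, PySem.List.pyIdx?, pvLabels, List.getD]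
                  ·
                    by_cases h9 : x ≤ 12500000
                    · cases c <;> simp [pvFindIdxA, pvTableA, pvLeThresh, h0, h1, h2, h3, h4, h5, h6, h7, h8, h9, PySem.List.pyGet?, PySem.List.pyIdx?, pvLabels, List.getD]
                    ·
                      by_cases h10 : x ≤ 25000000
                      · cases c <;> simp [pvFindIdxA, pvTableA, pvLeThresh, h0, h1, h2, h3, h4, h5, h6, h7, h8, h9, h10, PySem.List.pyGet?, PySem.List.pyIdx?, pvLabels, List.getD]
                      ·
                        by_cases h11 : x ≤ 50000000
                        · cases c <;> simp [pvFindIdxA, pvTableA, pvLeThresh, h0, h1, h2, h3, h4, h5, h6, h7, h8, h9, h10, h11, PySem.List.pyGet?, PySem.List.pyIdx?, pvLabels, List.getD]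
                        ·
                          cases c <;> simp [pvFindIdxA, pvTableA, pvLeThresh, h0, h1, h2, h3, h4, h5, h6, h7, h8, h9, h10, h11, PySem.List.pyGet?, PySem.List.pyIdx?, pvLabels, List.getD]
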